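-- pv_equiv track=rewrite | github.com/vikikkdi/path-planning-in-swarm | coordinates.py | generate_V
-- ===== SOURCE A (Python) =====
-- def generate_V(n):
-- 	v = []
-- 	x, y = 100, 100
-- 	diff = 50
-- 	for i in range(int(n/2)):
-- 		if i==0:
-- 			v.append([x,y])
-- 		else:
-- 			v.append([v[-1][0]+diff, v[-1][1]+diff])
-- 	if (int(n)%2)==1:
-- 		v.append([v[-1][0]+diff, v[-1][1]+diff])
-- 		for i in range(int(n/2)+1, n):
-- 			v.append([v[-1][0]+diff, v[-1][1]-diff])
-- 	else:
-- 		v.append([v[-1][0]+2*diff, v[-1][1]])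
-- 		for i in range(int(n/2)+1, n):
-- 			v.append([v[-1][0]+diff, v[-1][1]-diff])
--
-- 	return v
-- ===== SOURCE B (Python) =====
-- def generate_V(n):
--     n = int(n)
--     if n < 2:
--         return []
--     k = n // 2
--     asc = [[100 + 50 * i, 100 + 50 * i] for i in range(k)]
--     if n % 2 == 1:
--         ax, ay = 100 + 50 * k, 100 + 50 * k
--     else:
--         ax, ay = 150 + 50 * k, 50 + 50 * k
--     desc = [[ax + 50 * j, ay - 50 * j] for j in range(n - k)]
--     return asc + desc
-- ===== Notes on version B (the rewrite author's own statement) =====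
-- stated objective: simpler
-- what changed: B replaces A's element-by-element recurrence (every point computed from v[-1]) by closed-form per-index formulas: a comprehension for the ascending arm and one for the apex-plus-descending arm.
import Mathlib
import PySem

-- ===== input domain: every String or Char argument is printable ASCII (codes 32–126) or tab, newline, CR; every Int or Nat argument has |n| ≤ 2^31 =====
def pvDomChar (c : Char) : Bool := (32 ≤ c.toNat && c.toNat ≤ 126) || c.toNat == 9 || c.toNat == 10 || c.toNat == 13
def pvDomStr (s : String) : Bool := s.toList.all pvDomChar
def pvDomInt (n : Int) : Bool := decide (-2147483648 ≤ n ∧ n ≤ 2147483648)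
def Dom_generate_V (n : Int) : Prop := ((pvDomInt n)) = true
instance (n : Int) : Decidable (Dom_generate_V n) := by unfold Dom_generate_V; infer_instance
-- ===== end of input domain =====

-- B replaces A's element-by-element recurrence (each point built from v[-1]) by closed-form
-- per-index formulas for the ascending arm, the apex and the descending arm: objective 'simpler'.
-- A raises IndexError for n < 2 (v[-1] on the empty list); those inputs are outside Pre_.

-- ===== PORT A =====
-- v[-1][0] / v[-1][1]: Python raises IndexError when the list is empty; that happens only for
-- n < 2, excluded by Pre_; the port returns the .getD default there (a value Python never returns).
def pvLastX (v : List (List Int)) : Int :=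
  (PySem.List.pyGet? ((PySem.List.pyGet? v (-1)).getD []) 0).getD 0
def pvLastY (v : List (List Int)) : Int :=
  (PySem.List.pyGet? ((PySem.List.pyGet? v (-1)).getD []) 1).getD 0
def pvStepAsc (v : List (List Int)) (i : Int) : List (List Int) :=
  if i == 0 then v ++ [[100, 100]]
  else v ++ [[pvLastX v + 50, pvLastY v + 50]]
def pvStepDesc (v : List (List Int)) (_i : Int) : List (List Int) :=
  v ++ [[pvLastX v + 50, pvLastY v - 50]]

def generate_V (n : Int) : List (List Int) :=
  -- int(n/2): exact here — float division of a 32-bit int by 2 is exact, int() truncates toward zero = Int.tdiv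
  let half : Int := n.tdiv 2
  let v := (PySem.List.pyRange 0 half 1).foldl pvStepAsc []
  if PySem.Int.mod n 2 == 1 then
    let v := v ++ [[pvLastX v + 50, pvLastY v + 50]]
    (PySem.List.pyRange (half + 1) n 1).foldl pvStepDesc v
  else
    let v := v ++ [[pvLastX v + 2 * 50, pvLastY v]]
    (PySem.List.pyRange (half + 1) n 1).foldl pvStepDesc v

-- ===== PORT B =====
def generate_V_alt (n : Int) : List (List Int) :=
  if n < 2 then []
  else
    let k := PySem.Int.floordiv n 2
    let asc := (PySem.List.pyRange 0 k 1).map (fun i => [100 + 50 * i, 100 + 50 * i])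
    let p := if PySem.Int.mod n 2 == 1 then (100 + 50 * k, 100 + 50 * k)
             else (150 + 50 * k, 50 + 50 * k)
    let desc := (PySem.List.pyRange 0 (n - k) 1).map (fun j => [p.1 + 50 * j, p.2 - 50 * j])
    asc ++ desc

-- ===== PRECONDITION & SPEC =====
-- Pre_ excludes exactly n < 2, where Python A raises IndexError (v[-1] on the empty list).
def Pre_generate_V (n : Int) : Prop := 2 ≤ n
instance (n : Int) : Decidable (Pre_generate_V n) := by unfold Pre_generate_V; infer_instance
def pvWitness_generate_V : Int := (5)

def Spec_generate_V (n : Int) (out : List (List Int)) : Prop := out = generate_V_alt n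
instance (n : Int) (out : List (List Int)) : Decidable (Spec_generate_V n out) := by unfold Spec_generate_V; infer_instance

-- ===== CLAIM (what is proved, stated in full; the proofs are below) =====
def Claim_equal_generate_V : Prop := ∀ (n : Int), Dom_generate_V n → Pre_generate_V n → Spec_generate_V n (generate_V n)

-- ===== LEMMAS AND PROOFS =====

-- The ascending fold builds exactly the per-index ascending arm.
theorem ascFold (k : Nat) :
    (PySem.List.pyRange 0 k 1).foldl pvStepAsc []
      = (List.range k).map (fun (i : Nat) => [100 + 50 * (i : Int), 100 + 50 * (i : Int)]) := by
  induction k with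
  | zero => simp
  | succ m ih =>
    have h : PySem.List.pyRange 0 ((m : Int) + 1) 1
        = PySem.List.pyRange 0 (m : Int) 1 ++ [(m : Int)] :=
      PySem.List.pyRange_one_succ_right (by positivity)
    push_cast
    rw [h, List.foldl_append, ih]
    cases m with
    | zero => simp [pvStepAsc]
    | succ p =>
      have hlast : ((List.range (p+1)).map
          (fun (i : Nat) => [100 + 50 * (i : Int), 100 + 50 * (i : Int)])).getLast?
          = some [100 + 50 * (p : Int), 100 + 50 * (p : Int)] := by
        rw [List.range_succ]
        simp
      simp only [List.foldl_cons, List.foldl_nil, pvStepAsc, pvLastX, pvLastY,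
        PySem.List.pyGet?_neg_one, hlast]
      rw [List.range_succ (n := p + 1), List.map_append]
      rw [if_neg (by simp only [beq_iff_eq]; push_cast; omega)]
      simp only [Option.getD_some, List.map_cons, List.map_nil]
      congr 1

-- Last element of the ascending arm.
theorem ascLast (p : Nat) :
    ((List.range (p + 1)).map
        (fun (i : Nat) => [100 + 50 * (i : Int), 100 + 50 * (i : Int)])).getLast?
      = some [100 + 50 * (p : Int), 100 + 50 * (p : Int)] := by
  rw [List.range_succ]; simp

-- B's ascending comprehension over pyRange equals the same map over List.range.
theorem ascB (k : Nat) :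
    (PySem.List.pyRange 0 (k : Int) 1).map (fun i => [100 + 50 * i, 100 + 50 * i])
      = (List.range k).map (fun (i : Nat) => [100 + 50 * (i : Int), 100 + 50 * (i : Int)]) := by
  rw [PySem.List.pyRange_one]
  simp [List.map_map, Function.comp_def]

-- B's descending comprehension = apex followed by the descFold closed form.
theorem descB (m : Nat) (ax ay : Int) :
    (PySem.List.pyRange 0 ((m : Int) + 1) 1).map (fun j => [ax + 50 * j, ay - 50 * j])
      = [ax, ay] :: (List.range m).map
          (fun (j : Nat) => [ax + 50 * ((j : Int) + 1), ay - 50 * ((j : Int) + 1)]) := by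
  rw [PySem.List.pyRange_one]
  have ht : (((m : Int) + 1) - 0).toNat = m + 1 := by omega
  rw [ht, List.range_succ_eq_map]
  simp only [List.map_map, List.map_cons, Function.comp_def]
  refine congrArg₂ List.cons (by norm_num) ?_
  apply List.map_congr_left
  intro j _
  simp only [List.cons.injEq, and_true]
  exact ⟨by push_cast; ring, by push_cast; ring⟩

-- The descending fold appends closed-form points; only the length of the range matters.
theorem descFold (l : List Int) (v : List (List Int)) (lx ly : Int)
    (h : v.getLast? = some [lx, ly]) :
    l.foldl pvStepDesc v
      = v ++ (List.range l.length).map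
          (fun (j : Nat) => [lx + 50 * ((j : Int) + 1), ly - 50 * ((j : Int) + 1)]) := by
  induction l generalizing v lx ly with
  | nil => simp
  | cons a l ih =>
    have hstep : pvStepDesc v a = v ++ [[lx + 50, ly - 50]] := by
      simp [pvStepDesc, pvLastX, pvLastY, PySem.List.pyGet?_neg_one, h]
    have hlast2 : (v ++ [[lx + 50, ly - 50]]).getLast? = some [lx + 50, ly - 50] := by simp
    rw [List.foldl_cons, hstep, ih _ _ _ hlast2]
    rw [List.append_assoc]
    congr 1
    rw [List.length_cons, List.range_succ_eq_map, List.map_cons, List.map_map]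
    rw [List.singleton_append]
    refine congrArg₂ List.cons (by norm_num) ?_
    apply List.map_congr_left
    intro j _
    simp only [Function.comp_apply, List.cons.injEq, and_true]
    exact ⟨by push_cast; ring, by push_cast; ring⟩

-- ===== VERDICT (by name: the statement is the Claim_ definition above) =====
theorem generate_V_spec : Claim_equal_generate_V := by
  intro n _ hpre
  unfold Pre_generate_V at hpre
  unfold Spec_generate_V
  have htd : n.tdiv 2 = n / 2 := Int.tdiv_eq_ediv_of_nonneg (by omega)
  have hfd : PySem.Int.floordiv n 2 = n / 2 := PySem.Int.floordiv_eq_ediv_of_pos (by omega)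
  obtain ⟨p, hp⟩ : ∃ p : Nat, ((p : Int) + 1) = n / 2 := ⟨(n / 2 - 1).toNat, by omega⟩
  obtain ⟨m, hm⟩ : ∃ m : Nat, ((m : Int) + 1) = n - n / 2 := ⟨(n - n / 2 - 1).toNat, by omega⟩
  have hcast : n / 2 = (((p + 1 : Nat) : Int)) := by push_cast; omega
  have hplen : (PySem.List.pyRange (((p + 1 : Nat) : Int) + 1) n 1).length = m := by
    rw [PySem.List.length_pyRange_one]; omega
  have hnk : n - ((p + 1 : Nat) : Int) = (m : Int) + 1 := by push_cast; omega
  have hax : pvLastX ((List.range (p + 1)).map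
      (fun (i : Nat) => [100 + 50 * (i : Int), 100 + 50 * (i : Int)])) = 100 + 50 * (p : Int) := by
    simp [pvLastX, PySem.List.pyGet?_neg_one, ascLast p]
  have hay : pvLastY ((List.range (p + 1)).map
      (fun (i : Nat) => [100 + 50 * (i : Int), 100 + 50 * (i : Int)])) = 100 + 50 * (p : Int) := by
    simp only [pvLastY, PySem.List.pyGet?_neg_one, ascLast p, Option.getD_some]
    rw [show ((1:Int)) = ((0:Nat):Int) + 1 from by norm_num, PySem.List.pyGet?_cons_succ]
    simp
  unfold generate_V generate_V_alt
  rw [if_neg (show ¬ n < 2 from by omega)]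
  simp only [htd, hfd, hcast, ascB, ascFold]
  by_cases hmod : (PySem.Int.mod n 2 == 1) = true
  · rw [if_pos hmod, if_pos hmod]
    rw [hax, hay,
      descFold _ _ (100 + 50 * (p : Int) + 50) (100 + 50 * (p : Int) + 50) (by simp),
      hplen, hnk, descB]
    rw [List.append_assoc]
    congr 1
  · rw [if_neg hmod, if_neg hmod]
    rw [hax, hay,
      descFold _ _ (100 + 50 * (p : Int) + 2 * 50) (100 + 50 * (p : Int)) (by simp),
      hplen, hnk, descB]
    rw [List.append_assoc]
    congr 1
    rw [List.singleton_append]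
    refine congrArg₂ List.cons
      (by simp only [List.cons.injEq, and_true]; exact ⟨by push_cast; ring, by push_cast; ring⟩) ?_
    apply List.map_congr_left
    intro j _
    simp only [List.cons.injEq, and_true]
    exact ⟨by push_cast; ring, by push_cast; ring⟩
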